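-- pv_equiv track=rewrite | github.com/GiraffeReversed/edulint | edulint/config/config.py | _resolve_enable_disable_all
-- ===== SOURCE A (Python) =====
-- from typing import Dict, List, Optional, Tuple, Iterator, Any
--
-- def _resolve_enable_disable_all(pylint_args: List[str]) -> List[str]:
--     result = []
--     all_set, enable = False, False
--     for arg in reversed(pylint_args):
--         arg = arg.lower()
--         if arg == "--enable=noop":
--             pass
--         elif arg in ("--disable=all", "--enable=all"):
--             if all_set:
--                 continue
--             all_set = True
--             enable = arg == "--enable=all"
--         elif all_set and (
--             (arg.startswith("--disable") and enable)
--             or (arg.startswith("--enable") and not enable)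
--         ):
--             continue
--         result.append(arg)
--
--     result.reverse()
--     return result
-- ===== SOURCE B (Python) =====
-- def _resolve_enable_disable_all(pylint_args):
--     lowered = [a.lower() for a in pylint_args]
--     pivot, enable = None, False
--     for i, a in enumerate(lowered):
--         if a in ("--disable=all", "--enable=all"):
--             pivot, enable = i, (a == "--enable=all")
--     out = []
--     for i, a in enumerate(lowered):
--         if a == "--enable=noop":
--             out.append(a)
--         elif a in ("--disable=all", "--enable=all"):
--             if i == pivot:
--                 out.append(a)
--         elif pivot is not None and i < pivot and (
--                 (a.startswith("--disable") and enable)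
--                 or (a.startswith("--enable") and not enable)):
--             pass
--         else:
--             out.append(a)
--     return out
-- ===== Notes on version B (the rewrite author's own statement) =====
-- stated objective: alternative
-- what changed: A walks the list backwards carrying mutable all_set/enable flags and reverses the result; B first locates the pivot (index of the last --disable=all/--enable=all) in one scan and then does a single forward pass keeping each lowercased arg by comparing its index with the pivot, producing the output in order without a final reverse.
import Mathlib
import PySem

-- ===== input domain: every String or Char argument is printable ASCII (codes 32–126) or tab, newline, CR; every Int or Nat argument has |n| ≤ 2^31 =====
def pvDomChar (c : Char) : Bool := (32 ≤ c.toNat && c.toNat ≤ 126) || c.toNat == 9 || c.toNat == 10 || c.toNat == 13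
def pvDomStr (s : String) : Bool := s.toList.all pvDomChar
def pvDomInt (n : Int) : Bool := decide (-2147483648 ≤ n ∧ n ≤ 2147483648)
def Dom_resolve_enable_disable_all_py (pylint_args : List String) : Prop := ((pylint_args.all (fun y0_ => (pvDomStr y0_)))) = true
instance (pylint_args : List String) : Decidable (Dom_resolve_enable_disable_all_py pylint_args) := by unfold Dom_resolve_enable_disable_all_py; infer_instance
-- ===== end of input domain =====

-- B replaces A's backward scan with mutable flag state by a pivot pre-scan (index of the
-- last all-directive) plus one forward pass; objective: alternative decomposition, same value.

-- ===== PORT A =====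
-- arg in ("--disable=all", "--enable=all")
def isAllArg (a : String) : Bool := a == "--disable=all" || a == "--enable=all"

-- (arg.startswith("--disable") and enable) or (arg.startswith("--enable") and not enable)
def dropArg (e : Bool) (a : String) : Bool :=
  (PySem.Str.startswith a "--disable" && e) || (PySem.Str.startswith a "--enable" && !e)

-- one iteration of A's loop: state is (result, all_set, enable)
def aStep (st : List String × Bool × Bool) (arg0 : String) : List String × Bool × Bool :=
  let arg := PySem.Str.lower arg0
  if arg == "--enable=noop" then (st.1 ++ [arg], st.2.1, st.2.2)
  else if isAllArg arg then
    if st.2.1 then st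
    else (st.1 ++ [arg], true, arg == "--enable=all")
  else if st.2.1 && dropArg st.2.2 arg then st
  else (st.1 ++ [arg], st.2.1, st.2.2)

def resolve_enable_disable_all_py (pylint_args : List String) : List String :=
  (pylint_args.reverse.foldl aStep ([], false, false)).1.reverse

-- ===== PORT B =====
-- first pass: remember the index of the LAST all-directive and whether it enables
def bScan (acc : Option Int × Bool) (ia : Int × String) : Option Int × Bool :=
  if isAllArg ia.2 then (some ia.1, ia.2 == "--enable=all") else acc

-- second pass: keep/drop each (index, lowered arg) relative to the pivot
def bKeepStep (pivot : Option Int) (enable : Bool) (out : List String) (ia : Int × String) : List String :=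
  let a := ia.2
  if a == "--enable=noop" then out ++ [a]
  else if isAllArg a then
    match pivot with
    | some p => if ia.1 == p then out ++ [a] else out
    | none => out
  else
    match pivot with
    | some p => if decide (ia.1 < p) && dropArg enable a then out else out ++ [a]
    | none => out ++ [a]

def resolve_enable_disable_all_py_alt (pylint_args : List String) : List String :=
  let lowered := pylint_args.map PySem.Str.lower
  let pe := (PySem.List.enumerate lowered 0).foldl bScan (none, false)
  (PySem.List.enumerate lowered 0).foldl (bKeepStep pe.1 pe.2) []

-- ===== PRECONDITION & SPEC =====
def Spec_resolve_enable_disable_all_py (pylint_args : List String) (out : List String) : Prop := out = resolve_enable_disable_all_py_alt pylint_args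
instance (pylint_args : List String) (out : List String) : Decidable (Spec_resolve_enable_disable_all_py pylint_args out) := by unfold Spec_resolve_enable_disable_all_py; infer_instance

-- ===== CLAIM (what is proved, stated in full; the proofs are below) =====
def Claim_equal_resolve_enable_disable_all_py : Prop := ∀ (pylint_args : List String), Dom_resolve_enable_disable_all_py pylint_args → Spec_resolve_enable_disable_all_py pylint_args (resolve_enable_disable_all_py pylint_args)

-- ===== LEMMAS AND PROOFS =====

-- A's step on an already-lowered argument
def aStep' (st : List String × Bool × Bool) (arg : String) : List String × Bool × Bool :=
  if arg == "--enable=noop" then (st.1 ++ [arg], st.2.1, st.2.2)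
  else if isAllArg arg then
    if st.2.1 then st
    else (st.1 ++ [arg], true, arg == "--enable=all")
  else if st.2.1 && dropArg st.2.2 arg then st
  else (st.1 ++ [arg], st.2.1, st.2.2)

-- what both loops keep once the last all-directive (enable = e) is fixed
def keepArg (e : Bool) (a : String) : Bool :=
  if a == "--enable=noop" then true
  else if isAllArg a then false
  else !(dropArg e a)

theorem noop_not_all {a : String} (h : isAllArg a = true) : (a == "--enable=noop") = false := by
  unfold isAllArg at h
  rcases Bool.or_eq_true_iff.mp h with h | h <;>
    · rw [beq_iff_eq] at h; subst h; decide

-- Phase 0 of A (no all-directive yet): everything is appended, flags unchanged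
theorem aPhase0 (L : List String) (r : List String)
    (h : ∀ a ∈ L, isAllArg a = false) :
    L.foldl aStep' (r, false, false) = (r ++ L, false, false) := by
  induction L generalizing r with
  | nil => simp
  | cons a t ih =>
    have ha : isAllArg a = false := h a (by simp)
    have ht : ∀ x ∈ t, isAllArg x = false := fun x hx => h x (by simp [hx])
    rw [List.foldl_cons]
    by_cases hn : (a == "--enable=noop") = true
    · simp only [aStep', hn, if_true, Bool.false_and, Bool.false_eq_true, if_false]
      rw [ih _ ht]; simp
    · simp only [Bool.not_eq_true] at hn
      simp only [aStep', hn, ha, Bool.false_eq_true, if_false, Bool.false_and]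
      rw [ih _ ht]; simp

-- Phase 1 of A (all-directive seen, enable = e): filter by keepArg e
theorem aPhase1 (L : List String) (r : List String) (e : Bool) :
    L.foldl aStep' (r, true, e) = (r ++ L.filter (keepArg e), true, e) := by
  induction L generalizing r with
  | nil => simp
  | cons a t ih =>
    rw [List.foldl_cons, List.filter_cons]
    by_cases hn : (a == "--enable=noop") = true
    · have hk : keepArg e a = true := by simp [keepArg, hn]
      simp only [aStep', hn, if_true, hk]
      rw [ih]; simp
    · simp only [Bool.not_eq_true] at hn
      by_cases hA : isAllArg a = true
      · have hk : keepArg e a = false := by simp [keepArg, hn, hA]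
        simp only [aStep', hn, Bool.false_eq_true, if_false, hA, if_true, hk]
        rw [ih]
      · simp only [Bool.not_eq_true] at hA
        by_cases hd : dropArg e a = true
        · have hk : keepArg e a = false := by simp [keepArg, hn, hA, hd]
          simp only [aStep', hn, hA, Bool.false_eq_true, if_false, Bool.true_and, hd, if_true, hk]
          rw [ih]
        · simp only [Bool.not_eq_true] at hd
          have hk : keepArg e a = true := by simp [keepArg, hn, hA, hd]
          simp only [aStep', hn, hA, Bool.false_eq_true, if_false, Bool.true_and, hd, hk, if_true]
          rw [ih]; simp

-- B's pivot scan ignores lists without all-directives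
theorem bScan_noAll (L : List String) (s : Int) (acc : Option Int × Bool)
    (h : ∀ a ∈ L, isAllArg a = false) :
    (PySem.List.enumerate L s).foldl bScan acc = acc := by
  induction L generalizing s acc with
  | nil => simp [PySem.List.enumerate_nil]
  | cons a t ih =>
    have ha : isAllArg a = false := h a (by simp)
    rw [PySem.List.enumerate_cons, List.foldl_cons]
    simp only [bScan, ha, Bool.false_eq_true, if_false]
    exact ih _ _ (fun x hx => h x (by simp [hx]))

-- B with no pivot keeps every (all-free) argument
theorem bKeep_none (L : List String) (s : Int) (out : List String) (e : Bool)
    (h : ∀ a ∈ L, isAllArg a = false) :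
    (PySem.List.enumerate L s).foldl (bKeepStep none e) out = out ++ L := by
  induction L generalizing s out with
  | nil => simp [PySem.List.enumerate_nil]
  | cons a t ih =>
    have ha : isAllArg a = false := h a (by simp)
    rw [PySem.List.enumerate_cons, List.foldl_cons]
    have ht := fun x hx => h x (List.mem_cons_of_mem a hx)
    by_cases hn : (a == "--enable=noop") = true
    · simp only [bKeepStep, hn, if_true]
      rw [ih _ _ ht]; simp
    · simp only [Bool.not_eq_true] at hn
      simp only [bKeepStep, hn, ha, Bool.false_eq_true, if_false]
      rw [ih _ _ ht]; simp

-- B keeps every (all-free) argument strictly after the pivot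
theorem bKeep_hi (L : List String) (s m : Int) (out : List String) (e : Bool)
    (hm : m < s) (h : ∀ a ∈ L, isAllArg a = false) :
    (PySem.List.enumerate L s).foldl (bKeepStep (some m) e) out = out ++ L := by
  induction L generalizing s out with
  | nil => simp [PySem.List.enumerate_nil]
  | cons a t ih =>
    have ha : isAllArg a = false := h a (by simp)
    rw [PySem.List.enumerate_cons, List.foldl_cons]
    have ht := fun x hx => h x (List.mem_cons_of_mem a hx)
    have hlt : decide (s < m) = false := by simp; omega
    by_cases hn : (a == "--enable=noop") = true
    · simp only [bKeepStep, hn, if_true]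
      rw [ih _ _ (by omega) ht]; simp
    · simp only [Bool.not_eq_true] at hn
      simp only [bKeepStep, hn, ha, Bool.false_eq_true, if_false, hlt, Bool.false_and]
      rw [ih _ _ (by omega) ht]; simp

-- B filters arguments strictly before the pivot by keepArg e
theorem bKeep_lo (L : List String) (s m : Int) (out : List String) (e : Bool)
    (hm : s + L.length ≤ m) :
    (PySem.List.enumerate L s).foldl (bKeepStep (some m) e) out
      = out ++ L.filter (keepArg e) := by
  induction L generalizing s out with
  | nil => simp [PySem.List.enumerate_nil]
  | cons a t ih =>
    rw [PySem.List.enumerate_cons, List.foldl_cons, List.filter_cons]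
    have hlen : s + ((a :: t).length : Int) ≤ m := hm
    simp only [List.length_cons] at hlen
    have hne : (s == m) = false := by simp; push_cast at hlen; omega
    have hlt : decide (s < m) = true := by simp; push_cast at hlen; omega
    have hm' : (s + 1) + (t.length : Int) ≤ m := by push_cast at hlen ⊢; omega
    by_cases hn : (a == "--enable=noop") = true
    · have hk : keepArg e a = true := by simp [keepArg, hn]
      simp only [bKeepStep, hn, if_true, hk]
      rw [ih _ _ hm']; simp
    · simp only [Bool.not_eq_true] at hn
      by_cases hA : isAllArg a = true
      · have hk : keepArg e a = false := by simp [keepArg, hn, hA]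
        simp only [bKeepStep, hn, Bool.false_eq_true, if_false, hA, if_true, hne, hk]
        rw [ih _ _ hm']
      · simp only [Bool.not_eq_true] at hA
        by_cases hd : dropArg e a = true
        · have hk : keepArg e a = false := by simp [keepArg, hn, hA, hd]
          simp only [bKeepStep, hn, hA, Bool.false_eq_true, if_false, hlt, Bool.true_and, hd,
            if_true, hk]
          rw [ih _ _ hm']
        · simp only [Bool.not_eq_true] at hd
          have hk : keepArg e a = true := by simp [keepArg, hn, hA, hd]
          simp only [bKeepStep, hn, hA, Bool.false_eq_true, if_false, hlt, Bool.true_and, hd, hk,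
            if_true]
          rw [ih _ _ hm']; simp

-- every list is all-free, or splits around its LAST all-directive
theorem decompose (L : List String) :
    (∀ a ∈ L, isAllArg a = false) ∨
      ∃ xs p ys, L = xs ++ p :: ys ∧ isAllArg p = true ∧ ∀ a ∈ ys, isAllArg a = false := by
  induction L with
  | nil => exact Or.inl (by simp)
  | cons a t ih =>
    rcases ih with h | ⟨xs, p, ys, rfl, hp, hys⟩
    · by_cases ha : isAllArg a = true
      · exact Or.inr ⟨[], a, t, rfl, ha, h⟩
      · simp only [Bool.not_eq_true] at ha
        refine Or.inl fun x hx => ?_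
        rcases List.mem_cons.mp hx with rfl | hx
        · exact ha
        · exact h x hx
    · exact Or.inr ⟨a :: xs, p, ys, rfl, hp, hys⟩

-- the core equivalence, stated on the already-lowered list
theorem core (L : List String) :
    (L.reverse.foldl aStep' ([], false, false)).1.reverse
      = (PySem.List.enumerate L 0).foldl
          (bKeepStep ((PySem.List.enumerate L 0).foldl bScan (none, false)).1
                     ((PySem.List.enumerate L 0).foldl bScan (none, false)).2) [] := by
  rcases decompose L with h | ⟨xs, p, ys, rfl, hp, hys⟩
  · have hrev : ∀ a ∈ L.reverse, isAllArg a = false := fun a ha => h a (List.mem_reverse.mp ha)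
    rw [aPhase0 _ _ hrev, bScan_noAll _ _ _ h]
    rw [bKeep_none _ _ _ _ h]
    simp
  · have hysrev : ∀ a ∈ ys.reverse, isAllArg a = false :=
      fun a ha => hys a (List.mem_reverse.mp ha)
    have hnoop := noop_not_all hp
    set e := (p == "--enable=all") with he
    -- A side
    have hA : ((xs ++ p :: ys).reverse.foldl aStep' ([], false, false)).1.reverse
        = xs.filter (keepArg e) ++ p :: ys := by
      rw [List.reverse_append, List.reverse_cons, List.foldl_append, List.foldl_append,
        aPhase0 _ _ hysrev, List.nil_append, List.foldl_cons, List.foldl_nil]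
      have hstep : aStep' (ys.reverse, false, false) p = (ys.reverse ++ [p], true, e) := by
        simp only [aStep', hnoop, Bool.false_eq_true, if_false, hp, if_true, ← he]
      rw [hstep, aPhase1]
      simp [List.filter_reverse]
    rw [hA]
    -- B side
    set m : Int := (xs.length : Int) with hmdef
    have henum : PySem.List.enumerate (xs ++ p :: ys) 0
        = PySem.List.enumerate xs 0 ++ (m, p) :: PySem.List.enumerate ys (m + 1) := by
      rw [PySem.List.enumerate_append, PySem.List.enumerate_cons]
      simp [hmdef]
    have hscan : ((PySem.List.enumerate (xs ++ p :: ys) 0).foldl bScan (none, false))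
        = (some m, e) := by
      rw [henum, List.foldl_append, List.foldl_cons]
      have h1 : bScan ((PySem.List.enumerate xs 0).foldl bScan (none, false)) (m, p)
          = (some m, e) := by simp only [bScan, hp, if_true, ← he]
      rw [h1, bScan_noAll _ _ _ hys]
    rw [hscan]
    symm
    have hpivstep : bKeepStep (some m) e (xs.filter (keepArg e)) (m, p)
        = xs.filter (keepArg e) ++ [p] := by
      simp only [bKeepStep, hnoop, Bool.false_eq_true, if_false, hp, if_true, beq_self_eq_true]
    calc (PySem.List.enumerate (xs ++ p :: ys) 0).foldl (bKeepStep (some m, e).1 (some m, e).2) []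
        = ((m, p) :: PySem.List.enumerate ys (m + 1)).foldl (bKeepStep (some m) e)
            (xs.filter (keepArg e)) := by
          rw [henum, List.foldl_append, bKeep_lo _ _ _ _ _ (by simp [hmdef]), List.nil_append]
      _ = (PySem.List.enumerate ys (m + 1)).foldl (bKeepStep (some m) e)
            (xs.filter (keepArg e) ++ [p]) := by rw [List.foldl_cons, hpivstep]
      _ = xs.filter (keepArg e) ++ [p] ++ ys := bKeep_hi _ _ _ _ _ (by omega) hys
      _ = xs.filter (keepArg e) ++ p :: ys := by simp

-- ===== VERDICT (by name: the statement is the Claim_ definition above) =====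
theorem resolve_enable_disable_all_py_spec : Claim_equal_resolve_enable_disable_all_py := by
  intro l _
  unfold Spec_resolve_enable_disable_all_py resolve_enable_disable_all_py resolve_enable_disable_all_py_alt
  have hstep : aStep = fun st a => aStep' st (PySem.Str.lower a) := rfl
  rw [hstep, ← List.foldl_map, List.map_reverse]
  exact core (l.map PySem.Str.lower)
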